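-- pv_equiv track=rewrite | github.com/tubededentifrice/miployees | app/domain/tasks/schedules.py | _split_rdate_lines
-- ===== SOURCE A (Python) =====
-- def _split_rdate_lines(payload: str) -> list[str]:
--     """Split an RDATE / EXDATE payload into individual ISO-8601 lines.
--
--     Accepts either line-separated (``\\n``) or semicolon-separated
--     input; empty segments are dropped. The caller is free to pass
--     the empty string; an empty payload returns an empty list.
--     """
--     if not payload.strip():
--         return []
--     separators = ("\n", ";")
--     parts: list[str] = [payload]
--     for sep in separators:
--         parts = [piece for chunk in parts for piece in chunk.split(sep)]
--     return [piece.strip() for piece in parts if piece.strip()]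
-- ===== SOURCE B (Python) =====
-- def _split_rdate_lines(payload: str) -> list[str]:
--     """Single character-level scan: cut on '\n'/';' as they appear, emitting
--     each stripped non-empty token immediately; no guard, no repeated splits."""
--     out: list[str] = []
--     buf: list[str] = []
--     for ch in payload:
--         if ch in "\n;":
--             tok = "".join(buf).strip()
--             if tok:
--                 out.append(tok)
--             buf = []
--         else:
--             buf.append(ch)
--     tok = "".join(buf).strip()
--     if tok:
--         out.append(tok)
--     return out
-- ===== Notes on version B (the rewrite author's own statement) =====
-- stated objective: alternative
-- what changed: Replaced the strip-guard plus two sequential whole-list split passes (first on newlines, then re-splitting every piece on semicolons) with a single character-level scan that cuts at either separator and emits each stripped non-empty token as it is completed.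
import Mathlib
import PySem

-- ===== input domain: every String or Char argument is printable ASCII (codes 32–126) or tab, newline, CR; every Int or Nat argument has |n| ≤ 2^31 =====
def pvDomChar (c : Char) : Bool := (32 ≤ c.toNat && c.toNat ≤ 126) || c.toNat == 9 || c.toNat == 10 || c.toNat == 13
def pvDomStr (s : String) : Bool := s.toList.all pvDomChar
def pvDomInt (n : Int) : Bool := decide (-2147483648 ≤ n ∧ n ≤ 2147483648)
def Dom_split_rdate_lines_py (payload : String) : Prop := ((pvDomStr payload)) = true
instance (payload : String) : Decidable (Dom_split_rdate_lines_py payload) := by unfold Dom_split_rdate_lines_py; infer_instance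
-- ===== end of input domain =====

-- B replaces A's guard plus two sequential full-list splits with one character-level
-- scan that cuts on '\n'/';' and emits stripped non-empty tokens as it goes (alternative decomposition).

-- ===== PORT A =====
def split_rdate_lines_py (payload : String) : List String :=
  if PySem.Str.strip payload = "" then []
  else
    let separators : List String := ["\n", ";"]
    let parts : List String := separators.foldl
      (fun (parts : List String) (sep : String) =>
        parts.flatMap (fun chunk => (PySem.Str.split? chunk sep).getD []))
      [payload]
    (parts.filter (fun piece => PySem.Str.strip piece != "")).map
      (fun piece => PySem.Str.strip piece)

-- ===== PORT B =====
-- "".join(buf).strip() is computed at the character level: PySem.Chars.strip on the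
-- buffered chars is exactly Python's str.strip of the joined string.
def pvAltFlush (buf : List Char) (out : List String) : List String :=
  let tok := PySem.Chars.strip buf
  if tok = [] then out else out ++ [String.ofList tok]

def pvAltLoop : List Char → List Char → List String → List String
  | [], buf, out => pvAltFlush buf out
  | c :: rest, buf, out =>
    if c = '\n' ∨ c = ';' then pvAltLoop rest [] (pvAltFlush buf out)
    else pvAltLoop rest (buf ++ [c]) out

def split_rdate_lines_py_alt (payload : String) : List String :=
  pvAltLoop payload.toList [] []

-- ===== PRECONDITION & SPEC =====
def Spec_split_rdate_lines_py (payload : String) (out : List String) : Prop := out = split_rdate_lines_py_alt payload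
instance (payload : String) (out : List String) : Decidable (Spec_split_rdate_lines_py payload out) := by unfold Spec_split_rdate_lines_py; infer_instance

-- ===== CLAIM (what is proved, stated in full; the proofs are below) =====
def Claim_equal_split_rdate_lines_py : Prop := ∀ (payload : String), Dom_split_rdate_lines_py payload → Spec_split_rdate_lines_py payload (split_rdate_lines_py payload)

-- ===== LEMMAS AND PROOFS =====

/-- Structural split on a single separator character. -/
def pvSplit1 (sep : Char) : List Char → List (List Char)
  | [] => [[]]
  | c :: rest => if c = sep then [] :: pvSplit1 sep rest
                 else (pvSplit1 sep rest).modifyHead (c :: ·)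

/-- Structural split on either '\n' or ';'. -/
def pvSplitAny : List Char → List (List Char)
  | [] => [[]]
  | c :: rest => if c = '\n' ∨ c = ';' then [] :: pvSplitAny rest
                 else (pvSplitAny rest).modifyHead (c :: ·)

/-- Strip each segment, drop the empties, pack as strings. -/
def pvEmit (segs : List (List Char)) : List String :=
  segs.filterMap (fun s =>
    let t := PySem.Chars.strip s
    if t = [] then none else some (String.ofList t))

theorem pvSplit1_ne_nil (sep : Char) (l : List Char) : pvSplit1 sep l ≠ [] := by
  cases l with
  | nil => simp [pvSplit1]
  | cons c rest =>
    simp only [pvSplit1]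
    split
    · simp
    · cases h : pvSplit1 sep rest with
      | nil => exact absurd h (pvSplit1_ne_nil sep rest)
      | cons a t => simp

theorem pvSplitAny_ne_nil (l : List Char) : pvSplitAny l ≠ [] := by
  cases l with
  | nil => simp [pvSplitAny]
  | cons c rest =>
    simp only [pvSplitAny]
    split
    · simp
    · cases h : pvSplitAny rest with
      | nil => exact absurd h (pvSplitAny_ne_nil rest)
      | cons a t => simp

theorem pvModifyHead_comp {α : Type} (f g : α → α) (l : List α) (h : l ≠ []) :
    (l.modifyHead g).modifyHead f = l.modifyHead (fun x => f (g x)) := by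
  cases l with
  | nil => simp at h
  | cons a t => simp

theorem pvModifyHead_nil_append (l : List (List Char)) :
    l.modifyHead (fun x => ([] : List Char) ++ x) = l := by
  cases l with
  | nil => rfl
  | cons a t => simp

/-- The fueled `splitOn.go` on a single-character separator computes `pvSplit1`. -/
theorem pvGo_single (sep : Char) :
    ∀ (fuel : Nat) (l cur : List Char) (acc : List (List Char)), l.length ≤ fuel →
      PySem.Chars.splitOn.go [sep] fuel l cur acc
        = acc.reverse ++ (pvSplit1 sep l).modifyHead (cur.reverse ++ ·) := by
  intro fuel
  induction fuel with
  | zero =>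
    intro l cur acc h
    have : l = [] := List.eq_nil_of_length_eq_zero (Nat.le_zero.mp h)
    subst this
    simp [PySem.Chars.splitOn.go, pvSplit1]
  | succ n ih =>
    intro l cur acc h
    cases l with
    | nil => simp [PySem.Chars.splitOn.go, pvSplit1]
    | cons c rest =>
      by_cases hc : c = sep
      · subst hc
        have hpre : List.isPrefixOf [c] (c :: rest) = true := by
          simp [List.isPrefixOf]
        simp only [PySem.Chars.splitOn.go, hpre, if_pos]
        rw [show List.drop [c].length (c :: rest) = rest from rfl]
        rw [ih rest [] (cur.reverse :: acc) (by simpa using Nat.le_of_succ_le_succ h)]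
        rw [List.reverse_nil, pvModifyHead_nil_append]
        simp [pvSplit1]
      · have hb : (sep == c) = false := beq_eq_false_iff_ne.mpr (fun hh => hc hh.symm)
        have hpre : List.isPrefixOf [sep] (c :: rest) = false := by
          simp [List.isPrefixOf, hb]
        simp only [PySem.Chars.splitOn.go, hpre, Bool.false_eq_true, if_false]
        rw [ih rest (c :: cur) acc (by simpa using Nat.le_of_succ_le_succ h)]
        simp only [pvSplit1, if_neg hc]
        rw [pvModifyHead_comp _ _ _ (pvSplit1_ne_nil sep rest)]
        simp

theorem pvSplitOn_single (sep : Char) (l : List Char) :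
    PySem.Chars.splitOn l [sep] = pvSplit1 sep l := by
  unfold PySem.Chars.splitOn
  rw [pvGo_single sep (l.length + 1) l [] [] (Nat.le_succ _)]
  rw [List.reverse_nil, List.reverse_nil, pvModifyHead_nil_append]
  rfl

theorem pvFlatMap_split1 (l : List Char) :
    (pvSplit1 '\n' l).flatMap (pvSplit1 ';') = pvSplitAny l := by
  induction l with
  | nil => simp [pvSplit1, pvSplitAny]
  | cons c rest ih =>
    by_cases hn : c = '\n'
    · subst hn
      simp [pvSplit1, pvSplitAny, ih]
    · cases hs : pvSplit1 '\n' rest with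
      | nil => exact absurd hs (pvSplit1_ne_nil _ _)
      | cons a t =>
        have e1 : pvSplit1 '\n' (c :: rest) = (a :: t).modifyHead (c :: ·) := by
          rw [← hs]; simp [pvSplit1, hn]
        have ih' : pvSplit1 ';' a ++ t.flatMap (pvSplit1 ';') = pvSplitAny rest := by
          rw [← ih, hs]; simp
        by_cases hsc : c = ';'
        · subst hsc
          rw [e1]
          simp only [List.modifyHead_cons, List.flatMap_cons]
          have e2 : pvSplit1 ';' (';' :: a) = [] :: pvSplit1 ';' a := by
            simp [pvSplit1]
          have e3 : pvSplitAny (';' :: rest) = [] :: pvSplitAny rest := by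
            simp [pvSplitAny]
          rw [e2, e3, List.cons_append, ih']
        · rw [e1]
          simp only [List.modifyHead_cons, List.flatMap_cons]
          have e2 : pvSplit1 ';' (c :: a) = (pvSplit1 ';' a).modifyHead (c :: ·) := by
            simp [pvSplit1, hsc]
          have e3 : pvSplitAny (c :: rest) = (pvSplitAny rest).modifyHead (c :: ·) := by
            simp [pvSplitAny, hn, hsc]
          rw [e2, e3, ← ih']
          cases hsa : pvSplit1 ';' a with
          | nil => exact absurd hsa (pvSplit1_ne_nil _ _)
          | cons b u => simp

/-- B's loop emits `out` followed by the tokens of the rest (with `buf` prepended to the first segment). -/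
theorem pvAltLoop_eq (cs : List Char) : ∀ (buf : List Char) (out : List String),
    pvAltLoop cs buf out = out ++ pvEmit ((pvSplitAny cs).modifyHead (buf ++ ·)) := by
  induction cs with
  | nil =>
    intro buf out
    unfold pvAltLoop pvAltFlush pvSplitAny pvEmit
    by_cases hb : PySem.Chars.strip buf = [] <;> simp [hb]
  | cons c rest ih =>
    intro buf out
    by_cases hc : c = '\n' ∨ c = ';'
    · simp only [pvAltLoop, if_pos hc]
      rw [ih [] (pvAltFlush buf out)]
      simp only [pvSplitAny, if_pos hc, List.modifyHead_cons, pvModifyHead_nil_append]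
      unfold pvAltFlush pvEmit
      by_cases hb : PySem.Chars.strip buf = []
      · simp [hb, List.filterMap_cons]
      · simp [hb, List.filterMap_cons]
    · simp only [pvAltLoop, if_neg hc]
      rw [ih (buf ++ [c]) out]
      simp only [pvSplitAny, if_neg hc]
      rw [pvModifyHead_comp _ _ _ (pvSplitAny_ne_nil rest)]
      simp

theorem pvStrip_eq_nil_iff (s : List Char) :
    PySem.Chars.strip s = [] ↔ ∀ c ∈ s, PySem.Chars.isspace c = true := by
  simp only [PySem.Chars.strip, PySem.Chars.rstrip, PySem.Chars.lstrip,
    List.reverse_eq_nil_iff, List.dropWhile_eq_nil_iff, List.mem_reverse]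
  constructor
  · intro h c hc
    have hmem : c ∈ s.takeWhile PySem.Chars.isspace ++ s.dropWhile PySem.Chars.isspace := by
      rw [List.takeWhile_append_dropWhile]; exact hc
    rcases List.mem_append.mp hmem with h1 | h2
    · exact List.mem_takeWhile_imp h1
    · exact h c h2
  · intro h c hc
    have hmem : c ∈ s.takeWhile PySem.Chars.isspace ++ s.dropWhile PySem.Chars.isspace :=
      List.mem_append.mpr (Or.inr hc)
    rw [List.takeWhile_append_dropWhile] at hmem
    exact h c hmem

theorem pvMem_splitAny (cs : List Char) : ∀ seg ∈ pvSplitAny cs, ∀ a ∈ seg, a ∈ cs := by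
  induction cs with
  | nil => intro seg hseg a ha; simp [pvSplitAny] at hseg; subst hseg; simp at ha
  | cons c rest ih =>
    intro seg hseg a ha
    by_cases hc : c = '\n' ∨ c = ';'
    · simp only [pvSplitAny, if_pos hc, List.mem_cons] at hseg
      rcases hseg with h | h
      · subst h; simp at ha
      · exact List.mem_cons_of_mem _ (ih seg h a ha)
    · simp only [pvSplitAny, if_neg hc] at hseg
      cases hs : pvSplitAny rest with
      | nil => exact absurd hs (pvSplitAny_ne_nil rest)
      | cons b t =>
        rw [hs] at hseg
        simp only [List.modifyHead_cons, List.mem_cons] at hseg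
        rcases hseg with h | h
        · subst h
          rcases List.mem_cons.mp ha with h' | h'
          · simp [h']
          · exact List.mem_cons_of_mem _ (ih b (by simp [hs]) a h')
        · exact List.mem_cons_of_mem _ (ih seg (by simp [hs, h]) a ha)

theorem pvEmit_all_space (segs : List (List Char))
    (h : ∀ seg ∈ segs, PySem.Chars.strip seg = []) : pvEmit segs = [] := by
  induction segs with
  | nil => rfl
  | cons a t ih =>
    simp only [pvEmit, List.filterMap_cons]
    rw [if_pos (h a (by simp))]
    exact ih (fun seg hs => h seg (by simp [hs]))

theorem pvOfList_eq_empty {l : List Char} (h : String.ofList l = "") : l = [] := by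
  have := congrArg String.toList h
  simpa using this

theorem pvEmit_eq_filter_map (segs : List (List Char)) :
    ((segs.map String.ofList).filter (fun piece => PySem.Str.strip piece != "")).map
      (fun piece => PySem.Str.strip piece) = pvEmit segs := by
  induction segs with
  | nil => rfl
  | cons a t ih =>
    have hstrip : PySem.Str.strip (String.ofList a) = String.ofList (PySem.Chars.strip a) := by
      simp [PySem.Str.strip]
    by_cases hnil : PySem.Chars.strip a = []
    · have hb : (PySem.Str.strip (String.ofList a) != "") = false := by
        rw [hstrip, hnil]
        decide
      have e1 : (String.ofList a :: t.map String.ofList).filter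
          (fun piece => PySem.Str.strip piece != "")
            = (t.map String.ofList).filter (fun piece => PySem.Str.strip piece != "") := by
        rw [List.filter_cons, hb]
        simp
      have e2 : pvEmit (a :: t) = pvEmit t := by
        simp [pvEmit, hnil]
      simp only [List.map_cons]
      rw [e1, e2, ih]
    · have hb : (PySem.Str.strip (String.ofList a) != "") = true := by
        rw [hstrip]
        exact bne_iff_ne.mpr (fun h => hnil (pvOfList_eq_empty h))
      have e1 : (String.ofList a :: t.map String.ofList).filter
          (fun piece => PySem.Str.strip piece != "")
            = String.ofList a :: (t.map String.ofList).filter (fun piece => PySem.Str.strip piece != "") := by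
        rw [List.filter_cons, hb]
        simp
      have e2 : pvEmit (a :: t) = String.ofList (PySem.Chars.strip a) :: pvEmit t := by
        simp [pvEmit, hnil]
      simp only [List.map_cons]
      rw [e1, e2, List.map_cons, hstrip, ih]

theorem pvAlt_eq_emit (payload : String) :
    split_rdate_lines_py_alt payload = pvEmit (pvSplitAny payload.toList) := by
  unfold split_rdate_lines_py_alt
  rw [pvAltLoop_eq, pvModifyHead_nil_append]
  rfl

theorem pvSplitStr_nl (chunk : String) :
    (PySem.Str.split? chunk "\n").getD [] = (pvSplit1 '\n' chunk.toList).map String.ofList := by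
  have ht : ("\n" : String).toList = ['\n'] := rfl
  simp [PySem.Str.split?, PySem.Chars.split?, ht, pvSplitOn_single]

theorem pvSplitStr_semi (chunk : String) :
    (PySem.Str.split? chunk ";").getD [] = (pvSplit1 ';' chunk.toList).map String.ofList := by
  have ht : (";" : String).toList = [';'] := rfl
  simp [PySem.Str.split?, PySem.Chars.split?, ht, pvSplitOn_single]

theorem pvFlatMap_semi (xs : List (List Char)) :
    (xs.map String.ofList).flatMap (fun chunk => (PySem.Str.split? chunk ";").getD [])
      = (xs.flatMap (pvSplit1 ';')).map String.ofList := by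
  induction xs with
  | nil => rfl
  | cons a t ih =>
    simp only [List.map_cons, List.flatMap_cons, ih, List.map_append]
    rw [pvSplitStr_semi (String.ofList a)]
    simp

-- ===== VERDICT (by name: the statement is the Claim_ definition above) =====
theorem split_rdate_lines_py_spec : Claim_equal_split_rdate_lines_py := by
  intro payload _
  show split_rdate_lines_py payload = split_rdate_lines_py_alt payload
  rw [pvAlt_eq_emit]
  unfold split_rdate_lines_py
  by_cases hg : PySem.Str.strip payload = ""
  · rw [if_pos hg]
    have hnil : PySem.Chars.strip payload.toList = [] := by
      have := congrArg String.toList hg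
      simpa [PySem.Str.strip] using this
    have hall := (pvStrip_eq_nil_iff _).mp hnil
    exact (pvEmit_all_space _ (fun seg hseg =>
      (pvStrip_eq_nil_iff seg).mpr (fun c hc => hall c (pvMem_splitAny _ seg hseg c hc)))).symm
  · rw [if_neg hg]
    simp only [List.foldl_cons, List.foldl_nil, List.flatMap_cons, List.flatMap_nil,
      List.append_nil]
    rw [pvSplitStr_nl payload, pvFlatMap_semi, pvFlatMap_split1, pvEmit_eq_filter_map]
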